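-- pv_equiv track=rewrite | github.com/AndreaMarro/elab-tutor | scripts/generate-brain-dataset.py | gen_setvalue_phrases
-- ===== SOURCE A (Python) =====
-- def gen_setvalue_phrases(comp_name, comp_alias):
--     phrases = []
--     if comp_name == "resistor":
--         for v in ["100", "220", "330", "470", "1k", "1000", "4.7k", "10k"]:
--             phrases.extend([
--                 f"Metti {comp_alias} a {v} ohm",
--                 f"Imposta {comp_alias} a {v}",
--                 f"Cambia {comp_alias} a {v} Ω",
--                 f"Resistenza da {v} ohm",
--             ])
--     elif comp_name == "capacitor":
--         for v in ["100uF", "10uF", "1uF", "470uF", "47uF"]: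
--             phrases.extend([
--                 f"Metti {comp_alias} a {v}",
--                 f"Imposta {comp_alias} a {v}",
--             ])
--     elif comp_name == "potentiometer":
--         for v in ["50%", "0%", "100%", "25%", "75%"]:
--             phrases.extend([
--                 f"Metti {comp_alias} al {v}",
--                 f"Imposta {comp_alias} a {v}",
--                 f"Regola {comp_alias} a {v}",
--             ])
--     return phrases
-- ===== SOURCE B (Python) =====
-- # Flat precomputed skeleton table: every complete phrase is written out once with
-- # "{}" marking the alias slot; rendering is a single replace pass over one flat
-- # list -- no per-value/per-template nested generation at all.
--
-- TEMPLATES = {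
--     "resistor": [
--         "Metti {} a 100 ohm",
--         "Imposta {} a 100",
--         "Cambia {} a 100 Ω",
--         "Resistenza da 100 ohm",
--         "Metti {} a 220 ohm",
--         "Imposta {} a 220",
--         "Cambia {} a 220 Ω",
--         "Resistenza da 220 ohm",
--         "Metti {} a 330 ohm",
--         "Imposta {} a 330",
--         "Cambia {} a 330 Ω",
--         "Resistenza da 330 ohm",
--         "Metti {} a 470 ohm",
--         "Imposta {} a 470",
--         "Cambia {} a 470 Ω",
--         "Resistenza da 470 ohm",
--         "Metti {} a 1k ohm",
--         "Imposta {} a 1k",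
--         "Cambia {} a 1k Ω",
--         "Resistenza da 1k ohm",
--         "Metti {} a 1000 ohm",
--         "Imposta {} a 1000",
--         "Cambia {} a 1000 Ω",
--         "Resistenza da 1000 ohm",
--         "Metti {} a 4.7k ohm",
--         "Imposta {} a 4.7k",
--         "Cambia {} a 4.7k Ω",
--         "Resistenza da 4.7k ohm",
--         "Metti {} a 10k ohm",
--         "Imposta {} a 10k",
--         "Cambia {} a 10k Ω",
--         "Resistenza da 10k ohm"
--     ],
--     "capacitor": [
--         "Metti {} a 100uF",
--         "Imposta {} a 100uF",
--         "Metti {} a 10uF",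
--         "Imposta {} a 10uF",
--         "Metti {} a 1uF",
--         "Imposta {} a 1uF",
--         "Metti {} a 470uF",
--         "Imposta {} a 470uF",
--         "Metti {} a 47uF",
--         "Imposta {} a 47uF"
--     ],
--     "potentiometer": [
--         "Metti {} al 50%",
--         "Imposta {} a 50%",
--         "Regola {} a 50%",
--         "Metti {} al 0%",
--         "Imposta {} a 0%",
--         "Regola {} a 0%",
--         "Metti {} al 100%",
--         "Imposta {} a 100%",
--         "Regola {} a 100%",
--         "Metti {} al 25%",
--         "Imposta {} a 25%",
--         "Regola {} a 25%",
--         "Metti {} al 75%",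
--         "Imposta {} a 75%",
--         "Regola {} a 75%"
--     ],
-- }
--
--
-- def gen_setvalue_phrases(comp_name, comp_alias):
--     return [t.replace("{}", comp_alias) for t in TEMPLATES.get(comp_name, [])]
-- ===== Notes on version B (the rewrite author's own statement) =====
-- stated objective: alternative
-- what changed: Replaced runtime generation (if/elif chain with nested value/template loops building each phrase from parts) by a flat precomputed table of complete phrase skeletons per component, with values already baked in and a single '{}' alias slot, rendered in one replace pass over the flat list.
import Mathlib
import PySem

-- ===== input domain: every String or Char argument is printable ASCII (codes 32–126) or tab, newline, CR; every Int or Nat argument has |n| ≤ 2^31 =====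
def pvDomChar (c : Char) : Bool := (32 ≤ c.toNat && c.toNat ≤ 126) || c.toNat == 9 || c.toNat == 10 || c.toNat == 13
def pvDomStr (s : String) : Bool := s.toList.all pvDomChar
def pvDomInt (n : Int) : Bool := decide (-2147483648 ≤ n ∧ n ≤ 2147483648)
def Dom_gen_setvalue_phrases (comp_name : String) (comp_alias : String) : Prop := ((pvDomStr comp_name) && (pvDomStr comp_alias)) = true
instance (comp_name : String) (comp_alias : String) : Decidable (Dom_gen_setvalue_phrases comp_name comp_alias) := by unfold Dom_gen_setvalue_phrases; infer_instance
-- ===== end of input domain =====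

-- B replaces A's per-value/per-template nested generation by one flat precomputed
-- table of complete phrase skeletons ("{}" = alias slot) rendered by a single
-- replace pass (objective: alternative — staged precomputation instead of nested loops).

-- ===== PORT A =====
-- literal transliteration: if/elif chain, loop over values, extend with 4/2/3 f-strings
def gen_setvalue_phrases (comp_name : String) (comp_alias : String) : List String :=
  let phrases : List String := []
  if comp_name == "resistor" then
    ["100", "220", "330", "470", "1k", "1000", "4.7k", "10k"].foldl (fun ph v =>
      ph ++ [ "Metti " ++ comp_alias ++ " a " ++ v ++ " ohm"
            , "Imposta " ++ comp_alias ++ " a " ++ v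
            , "Cambia " ++ comp_alias ++ " a " ++ v ++ " Ω"
            , "Resistenza da " ++ v ++ " ohm" ]) phrases
  else if comp_name == "capacitor" then
    ["100uF", "10uF", "1uF", "470uF", "47uF"].foldl (fun ph v =>
      ph ++ [ "Metti " ++ comp_alias ++ " a " ++ v
            , "Imposta " ++ comp_alias ++ " a " ++ v ]) phrases
  else if comp_name == "potentiometer" then
    ["50%", "0%", "100%", "25%", "75%"].foldl (fun ph v =>
      ph ++ [ "Metti " ++ comp_alias ++ " al " ++ v
            , "Imposta " ++ comp_alias ++ " a " ++ v
            , "Regola " ++ comp_alias ++ " a " ++ v ]) phrases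
  else phrases

-- ===== PORT B =====
-- the TEMPLATES dict of Source B: flat precomputed skeleton lists, "{}" = alias slot
def svTemplates : PySem.Dict String (List String) :=
  PySem.Dict.mk
  [ ("resistor",
      [
        "Metti {} a 100 ohm",
        "Imposta {} a 100",
        "Cambia {} a 100 Ω",
        "Resistenza da 100 ohm",
        "Metti {} a 220 ohm",
        "Imposta {} a 220",
        "Cambia {} a 220 Ω",
        "Resistenza da 220 ohm",
        "Metti {} a 330 ohm",
        "Imposta {} a 330",
        "Cambia {} a 330 Ω",
        "Resistenza da 330 ohm",
        "Metti {} a 470 ohm",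
        "Imposta {} a 470",
        "Cambia {} a 470 Ω",
        "Resistenza da 470 ohm",
        "Metti {} a 1k ohm",
        "Imposta {} a 1k",
        "Cambia {} a 1k Ω",
        "Resistenza da 1k ohm",
        "Metti {} a 1000 ohm",
        "Imposta {} a 1000",
        "Cambia {} a 1000 Ω",
        "Resistenza da 1000 ohm",
        "Metti {} a 4.7k ohm",
        "Imposta {} a 4.7k",
        "Cambia {} a 4.7k Ω",
        "Resistenza da 4.7k ohm",
        "Metti {} a 10k ohm",
        "Imposta {} a 10k",
        "Cambia {} a 10k Ω",
        "Resistenza da 10k ohm"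
      ])
  , ("capacitor",
      [
        "Metti {} a 100uF",
        "Imposta {} a 100uF",
        "Metti {} a 10uF",
        "Imposta {} a 10uF",
        "Metti {} a 1uF",
        "Imposta {} a 1uF",
        "Metti {} a 470uF",
        "Imposta {} a 470uF",
        "Metti {} a 47uF",
        "Imposta {} a 47uF"
      ])
  , ("potentiometer",
      [
        "Metti {} al 50%",
        "Imposta {} a 50%",
        "Regola {} a 50%",
        "Metti {} al 0%",
        "Imposta {} a 0%",
        "Regola {} a 0%",
        "Metti {} al 100%",
        "Imposta {} a 100%",
        "Regola {} a 100%",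
        "Metti {} al 25%",
        "Imposta {} a 25%",
        "Regola {} a 25%",
        "Metti {} al 75%",
        "Imposta {} a 75%",
        "Regola {} a 75%"
      ]) ]

-- [t.replace("{}", comp_alias) for t in TEMPLATES.get(comp_name, [])]
def gen_setvalue_phrases_alt (comp_name : String) (comp_alias : String) : List String :=
  (PySem.Dict.getD svTemplates comp_name []).map (fun t => PySem.Str.replace t "{}" comp_alias)

-- ===== PRECONDITION & SPEC =====
def Spec_gen_setvalue_phrases (comp_name : String) (comp_alias : String) (out : List String) : Prop := out = gen_setvalue_phrases_alt comp_name comp_alias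
instance (comp_name : String) (comp_alias : String) (out : List String) : Decidable (Spec_gen_setvalue_phrases comp_name comp_alias out) := by unfold Spec_gen_setvalue_phrases; infer_instance

-- ===== CLAIM =====
def Claim_equal_gen_setvalue_phrases : Prop := ∀ (comp_name : String) (comp_alias : String), Dom_gen_setvalue_phrases comp_name comp_alias → Spec_gen_setvalue_phrases comp_name comp_alias (gen_setvalue_phrases comp_name comp_alias)

-- ===== LEMMAS AND PROOFS =====

-- ===== VERDICT =====
theorem gen_setvalue_phrases_spec : Claim_equal_gen_setvalue_phrases := by
  intro n a _
  unfold Spec_gen_setvalue_phrases gen_setvalue_phrases gen_setvalue_phrases_alt svTemplates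
  by_cases h1 : n = "resistor"
  · subst h1
    simp [List.foldl, PySem.Dict.getD, PySem.Dict.get?, PySem.Str.replace,
          PySem.Chars.replace, PySem.Chars.replace.go, -String.length_toList, ← String.toList_inj]
  · by_cases h2 : n = "capacitor"
    · subst h2
      simp [List.foldl, PySem.Dict.getD, PySem.Dict.get?, PySem.Str.replace,
            PySem.Chars.replace, PySem.Chars.replace.go, -String.length_toList, ← String.toList_inj]
    · by_cases h3 : n = "potentiometer"
      · subst h3
        simp [List.foldl, PySem.Dict.getD, PySem.Dict.get?, PySem.Str.replace,
              PySem.Chars.replace, PySem.Chars.replace.go, -String.length_toList, ← String.toList_inj]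
      · have e1 : ("resistor" == n) = false := by simp [Ne.symm h1]
        have e2 : ("capacitor" == n) = false := by simp [Ne.symm h2]
        have e3 : ("potentiometer" == n) = false := by simp [Ne.symm h3]
        simp [PySem.Dict.getD, PySem.Dict.get?, List.find?, e1, e2, e3, h1, h2, h3]
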